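-- pv_equiv track=rewrite | github.com/joshanashakya/dissertation | workspace/dataset/java-python/GeeksForGeeks/3361/A/2.py | countMinimalReplacements
-- ===== SOURCE A (Python) =====
-- def countMinimalReplacements(s):
--
--     # Find the length of the string
--     n = len(s)
--
--     cnt = 0
--
--     # Iterate in the string
--     for i in range(1, n):
--
--         # Check if adjacent is similar
--         if (s[i] == s[i - 1]):
--             cnt += 1;
--
--             # If not the last pair
--             if (i != (n - 1)):
--
--                 # Check for character which is
--                 # not same in i+1 and i-1
--                 s = list(s)
--                 for j in "012":
--                     if (j != s[i + 1] and
--                         j != s[i - 1]):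
--                         s[i] = j
--                         break
--
--                 s = ''.join(s)
--
--             # Last pair
--             else:
--
--                 # Check for character which is
--                 # not same in i-1 index
--                 s = list(s)
--
--                 for k in "012":
--                     if (k != s[i - 1]):
--                         s[i] = k
--                         break
--                 s = ''.join(s)
--
--     return cnt
-- ===== SOURCE B (Python) =====
-- def countMinimalReplacements(s):
--     cnt = 0
--     i = 1
--     while i < len(s):
--         if s[i] == s[i - 1]:
--             cnt += 1
--             i += 2
--         else:
--             i += 1
--     return cnt
-- ===== Notes on version B (the rewrite author's own statement) =====
-- stated objective: faster
-- what changed: B replaces A's mutable string rebuilding (list/join and a nested three-candidate repair loop at every collision) with a single counting pass that skips the repaired position by advancing the index by 2; correctness rests on A's repair always differing from both neighbours.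
import Mathlib
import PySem

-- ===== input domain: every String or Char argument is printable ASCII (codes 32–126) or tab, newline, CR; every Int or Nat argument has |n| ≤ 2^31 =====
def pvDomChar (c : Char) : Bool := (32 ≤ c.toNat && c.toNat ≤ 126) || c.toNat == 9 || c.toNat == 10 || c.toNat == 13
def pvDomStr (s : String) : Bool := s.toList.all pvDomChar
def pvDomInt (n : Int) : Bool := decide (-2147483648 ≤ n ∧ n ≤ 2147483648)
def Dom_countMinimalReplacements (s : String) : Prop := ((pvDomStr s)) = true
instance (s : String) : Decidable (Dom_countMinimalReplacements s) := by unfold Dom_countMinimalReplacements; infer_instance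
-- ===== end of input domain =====

-- B replaces A's mutable string rebuilding (list/join + a nested repair loop per collision)
-- with a single counting pass that skips the repaired position (i += 2); objective: faster.

-- ===== PORT A =====
-- inner loop `for j in "012": if j != s[i+1] and j != s[i-1]: ... break` — first qualifying char
def pvFind2 (a b : Char) : Option Char := List.find? (fun j => j != a && j != b) "012".toList
-- inner loop `for k in "012": if k != s[i-1]: ... break`
def pvFind1 (a : Char) : Option Char := List.find? (fun k => k != a) "012".toList
-- `s[i] = j` when the inner loop found a char (it always does), else s unchanged
def pvSetPick (s : List Char) (i : Nat) (o : Option Char) : List Char :=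
  match o with
  | some j => s.set i j
  | none => s

theorem pvSetPick_length (s : List Char) (i : Nat) (o : Option Char) :
    (pvSetPick s i o).length = s.length := by
  cases o <;> simp [pvSetPick]

-- `for i in range(1, n)` over the mutable string (all reads are in range when 1 ≤ i < len)
def pvLoopA (s : List Char) (cnt : Int) (i : Nat) : Int :=
  if h : i < s.length then
    if s.getD i ' ' == s.getD (i - 1) ' ' then
      if i ≠ s.length - 1 then
        pvLoopA (pvSetPick s i (pvFind2 (s.getD (i + 1) ' ') (s.getD (i - 1) ' '))) (cnt + 1) (i + 1)
      else
        pvLoopA (pvSetPick s i (pvFind1 (s.getD (i - 1) ' '))) (cnt + 1) (i + 1)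
    else pvLoopA s cnt (i + 1)
  else cnt
termination_by s.length - i
decreasing_by all_goals (try simp only [pvSetPick_length]); omega

def countMinimalReplacements (s : String) : Int := pvLoopA s.toList 0 1

-- ===== PORT B =====
-- `while i < len(s): if s[i] == s[i-1]: cnt += 1; i += 2 else: i += 1`
def pvLoopB (s : List Char) (cnt : Int) (i : Nat) : Int :=
  if i < s.length then
    if s.getD i ' ' == s.getD (i - 1) ' ' then pvLoopB s (cnt + 1) (i + 2)
    else pvLoopB s cnt (i + 1)
  else cnt
termination_by s.length - i
decreasing_by all_goals omega

def countMinimalReplacements_alt (s : String) : Int := pvLoopB s.toList 0 1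

-- ===== PRECONDITION & SPEC =====
def Spec_countMinimalReplacements (s : String) (out : Int) : Prop := out = countMinimalReplacements_alt s
instance (s : String) (out : Int) : Decidable (Spec_countMinimalReplacements s out) := by unfold Spec_countMinimalReplacements; infer_instance

-- ===== CLAIM (what is proved, stated in full; the proofs are below) =====
def Claim_equal_countMinimalReplacements : Prop := ∀ (s : String), Dom_countMinimalReplacements s → Spec_countMinimalReplacements s (countMinimalReplacements s)

-- ===== LEMMAS AND PROOFS =====

-- proof-side characterisation of B: count over adjacent pairs, skipping after a hit
def pvCnt : List Char → Int
  | a :: b :: t => if b == a then 1 + pvCnt t else pvCnt (b :: t)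
  | _ => 0

theorem pvCnt_cons₂ (a b : Char) (t : List Char) :
    pvCnt (a :: b :: t) = if b == a then 1 + pvCnt t else pvCnt (b :: t) := rfl

theorem pvCnt_short (l : List Char) (h : l.length ≤ 1) : pvCnt l = 0 := by
  match l with
  | [] => rfl
  | [a] => rfl
  | a :: b :: t => simp at h

-- proof-side characterisation of A: same pass, carrying the previous char and the repair
def pvG (prev : Char) : List Char → Int
  | [] => 0
  | x :: t =>
    if x == prev then
      match t with
      | [] => 1
      | y :: t' => 1 + pvG ((pvFind2 y prev).getD ' ') (y :: t')
    else pvG x t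

theorem pvG_nil (prev : Char) : pvG prev [] = 0 := rfl

theorem pvG_one (prev x : Char) : pvG prev [x] = if x == prev then 1 else 0 := by
  by_cases h : (x == prev) = true <;> simp [pvG, h]

theorem pvG_cons₂ (prev x y : Char) (t : List Char) :
    pvG prev (x :: y :: t) =
      if x == prev then 1 + pvG ((pvFind2 y prev).getD ' ') (y :: t) else pvG x (y :: t) := by
  by_cases h : (x == prev) = true <;> simp [pvG, h]

theorem pvG_cons_ne (prev x : Char) (t : List Char) (h : (x == prev) = false) :
    pvG prev (x :: t) = pvG x t := by
  cases t <;> simp [pvG, h]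

theorem pvFind2_spec (a b : Char) : ∃ c, pvFind2 a b = some c ∧ c ≠ a ∧ c ≠ b := by
  by_cases h0a : ('0' : Char) = a
  · subst h0a
    by_cases h1b : ('1' : Char) = b
    · subst h1b; exact ⟨'2', by decide, by decide, by decide⟩
    · refine ⟨'1', ?_, by decide, h1b⟩
      have hb : ('1' != b) = true := bne_iff_ne.mpr h1b
      simp [pvFind2, List.find?, hb]
  · by_cases h0b : ('0' : Char) = b
    · subst h0b
      by_cases h1a : ('1' : Char) = a
      · subst h1a; exact ⟨'2', by decide, by decide, by decide⟩
      · refine ⟨'1', ?_, h1a, by decide⟩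
        have ha : ('1' != a) = true := bne_iff_ne.mpr h1a
        simp [pvFind2, List.find?, ha]
    · refine ⟨'0', ?_, h0a, h0b⟩
      have ha : ('0' != a) = true := bne_iff_ne.mpr h0a
      have hb : ('0' != b) = true := bne_iff_ne.mpr h0b
      simp [pvFind2, List.find?, ha, hb]

theorem pvG_eq (n : Nat) : ∀ (l : List Char), l.length ≤ n → ∀ prev, pvG prev l = pvCnt (prev :: l) := by
  induction n with
  | zero =>
    intro l hl prev
    have : l = [] := List.length_eq_zero_iff.mp (Nat.le_zero.mp hl)
    subst this; rw [pvG_nil, pvCnt_short _ (by simp)]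
  | succ n ih =>
    intro l hl prev
    match l with
    | [] => rw [pvG_nil, pvCnt_short _ (by simp)]
    | [x] =>
      rw [pvG_one, pvCnt_cons₂ prev x []]
      by_cases h : (x == prev) = true
      · rw [if_pos h, if_pos h, pvCnt_short [] (by simp)]; ring
      · rw [if_neg h, if_neg h, pvCnt_short [x] (by simp)]
    | x :: y :: t =>
      by_cases hx : (x == prev) = true
      · obtain ⟨c, hc, hcy, hcp⟩ := pvFind2_spec y prev
        have hyc : (y == c) = false := beq_eq_false_iff_ne.mpr (fun h => hcy h.symm)
        have ht : t.length ≤ n := by simp at hl; omega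
        rw [pvG_cons₂ prev x y t, if_pos hx, hc, Option.getD_some, pvG_cons_ne c y t hyc,
            ih t ht y, pvCnt_cons₂ prev x (y :: t), if_pos hx]
      · have ht : (y :: t).length ≤ n := by simp at hl ⊢; omega
        rw [pvG_cons₂ prev x y t, if_neg hx, ih (y :: t) ht x, pvCnt_cons₂ prev x (y :: t), if_neg hx]

theorem drop_set_of_lt (l : List Char) (i j : Nat) (a : Char) (h : i < j) :
    (l.set i a).drop j = l.drop j := by
  apply List.ext_getElem?
  intro k
  rw [List.getElem?_drop, List.getElem?_drop, List.getElem?_set_ne (by omega)]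

theorem pvLoopA_eq (k : Nat) : ∀ (s : List Char) (cnt : Int) (i : Nat),
    s.length - i ≤ k → 1 ≤ i → pvLoopA s cnt i = cnt + pvG (s.getD (i - 1) ' ') (s.drop i) := by
  induction k with
  | zero =>
    intro s cnt i hk hi
    rw [pvLoopA, dif_neg (by omega), List.drop_eq_nil_of_le (by omega), pvG_nil]
    ring
  | succ k ih =>
    intro s cnt i hk hi
    by_cases h : i < s.length
    · have hdi : s.drop i = s.getD i ' ' :: s.drop (i + 1) := by
        rw [List.drop_eq_getElem_cons h, List.getD_eq_getElem s ' ' h]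
      rw [pvLoopA, dif_pos h]
      by_cases heq : (s.getD i ' ' == s.getD (i - 1) ' ') = true
      · rw [if_pos heq]
        by_cases hlast : i ≠ s.length - 1
        · have h1 : i + 1 < s.length := by omega
          obtain ⟨c, hc, hca, hcb⟩ := pvFind2_spec (s.getD (i + 1) ' ') (s.getD (i - 1) ' ')
          rw [if_pos hlast, hc]
          have hset : pvSetPick s i (some c) = s.set i c := rfl
          rw [hset, ih (s.set i c) (cnt + 1) (i + 1) (by simp; omega) (by omega)]
          have hgd : (s.set i c).getD (i + 1 - 1) ' ' = c := by
            rw [Nat.add_sub_cancel, List.getD_eq_getElem _ ' ' (by simp; omega)]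
            simp
          have hdrop : (s.set i c).drop (i + 1) = s.drop (i + 1) := drop_set_of_lt s i (i + 1) c (by omega)
          have hd1 : s.drop (i + 1) = s.getD (i + 1) ' ' :: s.drop (i + 2) := by
            rw [List.drop_eq_getElem_cons h1, List.getD_eq_getElem s ' ' h1]
          rw [hgd, hdrop, hdi, hd1, pvG_cons₂, if_pos heq, hc, Option.getD_some, ← hd1]
          ring
        · push_neg at hlast
          rw [if_neg (by simp [hlast])]
          have hterm : pvLoopA (pvSetPick s i (pvFind1 (s.getD (i - 1) ' '))) (cnt + 1) (i + 1) = cnt + 1 := by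
            rw [pvLoopA, dif_neg (by rw [pvSetPick_length]; omega)]
          rw [hterm, hdi, List.drop_eq_nil_of_le (by omega), pvG_one, if_pos heq]
      · rw [if_neg heq, ih s cnt (i + 1) (by omega) (by omega), Nat.add_sub_cancel, hdi,
            pvG_cons_ne _ _ _ (by simp only [Bool.not_eq_true] at heq; exact heq)]
    · rw [pvLoopA, dif_neg h, List.drop_eq_nil_of_le (by omega), pvG_nil]
      ring

theorem pvLoopB_eq (k : Nat) : ∀ (s : List Char) (cnt : Int) (i : Nat),
    s.length - i ≤ k → 1 ≤ i → pvLoopB s cnt i = cnt + pvCnt (s.drop (i - 1)) := by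
  induction k with
  | zero =>
    intro s cnt i hk hi
    rw [pvLoopB, if_neg (by omega), pvCnt_short _ (by rw [List.length_drop]; omega)]
    ring
  | succ k ih =>
    intro s cnt i hk hi
    by_cases h : i < s.length
    · have hprev : i - 1 < s.length := by omega
      have hdp : s.drop (i - 1) = s.getD (i - 1) ' ' :: s.drop i := by
        rw [List.drop_eq_getElem_cons hprev, show i - 1 + 1 = i from by omega,
            List.getD_eq_getElem s ' ' hprev]
      have hdi : s.drop i = s.getD i ' ' :: s.drop (i + 1) := by
        rw [List.drop_eq_getElem_cons h, List.getD_eq_getElem s ' ' h]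
      rw [pvLoopB, if_pos h]
      by_cases heq : (s.getD i ' ' == s.getD (i - 1) ' ') = true
      · rw [if_pos heq, ih s (cnt + 1) (i + 2) (by omega) (by omega),
            show i + 2 - 1 = i + 1 from by omega, hdp, hdi, pvCnt_cons₂, if_pos heq]
        ring
      · rw [if_neg heq, ih s cnt (i + 1) (by omega) (by omega), Nat.add_sub_cancel, hdp, hdi,
            pvCnt_cons₂, if_neg heq, ← hdi]
    · rw [pvLoopB, if_neg h, pvCnt_short _ (by rw [List.length_drop]; omega)]
      ring

-- ===== VERDICT (by name: the statement is the Claim_ definition above) =====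
theorem countMinimalReplacements_spec : Claim_equal_countMinimalReplacements := by
  intro s _
  unfold Spec_countMinimalReplacements countMinimalReplacements countMinimalReplacements_alt
  rw [pvLoopA_eq s.toList.length s.toList 0 1 (by omega) (by omega),
      pvLoopB_eq s.toList.length s.toList 0 1 (by omega) (by omega)]
  simp only [Nat.sub_self, List.drop_zero]
  cases hl : s.toList with
  | nil => rw [List.drop_nil, pvG_nil, pvCnt_short _ (by simp)]
  | cons a t =>
    rw [List.getD_cons_zero, List.drop_succ_cons, List.drop_zero,
        pvG_eq t.length t (le_refl _) a]
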